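-- pv_equiv track=rewrite | github.com/VicePlr/MAD-Assignment-MSSV-HE211206-and-HE210791 | Q1.py | count_contain_s
-- ===== SOURCE A (Python) =====
-- A=['a','b','c','d']
--
-- def next(s):
--     for i in range(len(s)-1,-1,-1):
--         if s.count('d') == len(s):
--             return 'a'*(len(s)+1)
--         if s[i] == A[-1]:
--             pass
--         elif s[i] in A:
--             for n in range(len(A)):
--                 if A[n] == s[i]:
--                     s=s[0:i]+A[n+1]+'a'*len(s[i+1:])
--                     break
--             break
--     return s
--
-- def count_contain_s(n,s):
--     a='a'*n
--     count=0
--     while len(a) == n: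
--         if s in a:
--             count+=1
--         a=next(a)
--     return count
-- ===== SOURCE B (Python) =====
-- def count_contain_s(n, s):
--     if n < 0:
--         return 0
--     words = ['']
--     for _ in range(n):
--         words = [w + c for w in words for c in 'abcd']
--     return sum(1 for w in words if s in w)
-- ===== Notes on version B (the rewrite author's own statement) =====
-- stated objective: alternative
-- what changed: B replaces A's in-place lexicographic successor iteration (the next() helper repeatedly incrementing one mutable string) by building the full list of length-n words via n iterated Cartesian-product extensions and then counting matches in a single pass.
import Mathlib
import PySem

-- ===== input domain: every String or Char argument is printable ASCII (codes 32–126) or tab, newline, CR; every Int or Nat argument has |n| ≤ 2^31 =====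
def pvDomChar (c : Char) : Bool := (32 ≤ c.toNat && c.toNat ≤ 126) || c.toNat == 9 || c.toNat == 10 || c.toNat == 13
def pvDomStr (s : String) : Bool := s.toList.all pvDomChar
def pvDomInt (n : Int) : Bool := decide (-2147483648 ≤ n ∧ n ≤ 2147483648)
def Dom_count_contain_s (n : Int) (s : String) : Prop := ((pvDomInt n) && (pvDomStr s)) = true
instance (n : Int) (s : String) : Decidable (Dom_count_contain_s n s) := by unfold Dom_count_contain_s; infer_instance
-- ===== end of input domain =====

-- B replaces A's in-place lexicographic successor iteration (next()) by iterated Cartesian-product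
-- list building followed by one counting pass; same asymptotic cost, different algorithm ("alternative").

-- ===== PORT A =====
-- A = ['a','b','c','d']
def pvA : List Char := ['a', 'b', 'c', 'd']

-- inner 'for n in range(len(A)): if A[n]==s[i]: s = s[0:i]+A[n+1]+"a"*len(s[i+1:]); break' of next();
-- indexing uses pyGetD with a dummy default: every index reached here is in range, so this only totalizes.
def pvNextInner (s : List Char) (i : Int) : List Int → List Char
  | [] => s
  | n :: rest =>
    if PySem.List.pyGetD pvA n ' ' = PySem.List.pyGetD s i ' ' then
      PySem.List.slice s (some 0) (some i) ++
        [PySem.List.pyGetD pvA (n + 1) ' '] ++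
        List.replicate (PySem.List.slice s (some (i + 1)) none).length 'a'
    else pvNextInner s i rest

-- outer 'for i in range(len(s)-1,-1,-1)' of next(); a break returns immediately, loop exhaustion returns s
def pvNextGo (s : List Char) : List Int → List Char
  | [] => s
  | i :: rest =>
    if PySem.Chars.count s ['d'] = s.length then List.replicate (s.length + 1) 'a'
    else if PySem.List.pyGetD s i ' ' = PySem.List.pyGetD pvA (-1) ' ' then pvNextGo s rest
    else if PySem.List.pyGetD s i ' ' ∈ pvA then
      pvNextInner s i (PySem.List.pyRange 0 (pvA.length : Int) 1)
    else pvNextGo s rest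

def pvNext (s : List Char) : List Char :=
  pvNextGo s (PySem.List.pyRange ((s.length : Int) - 1) (-1) (-1))

-- 'while len(a)==n: if s in a: count+=1; a=next(a)'; fuel 4^n+1 covers every iteration the loop performs
def pvLoopA (n : Int) (s : List Char) : Nat → List Char → Int → Int
  | 0, _, count => count
  | fuel + 1, a, count =>
    if (a.length : Int) = n then
      pvLoopA n s fuel (pvNext a) (count + if PySem.Chars.isIn s a then 1 else 0)
    else count

def count_contain_s (n : Int) (s : String) : Int :=
  pvLoopA n s.toList (4 ^ n.toNat + 1) (List.replicate n.toNat 'a') 0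

-- ===== PORT B =====
def count_contain_s_alt (n : Int) (s : String) : Int :=
  if n < 0 then 0
  else
    let words := (PySem.List.pyRange 0 n 1).foldl
      (fun ws _ => ws.flatMap (fun w => ['a', 'b', 'c', 'd'].map (fun c => w ++ [c])))
      [([] : List Char)]
    words.foldl (fun acc w => if PySem.Chars.isIn s.toList w then acc + 1 else acc) 0

-- ===== PRECONDITION & SPEC =====
-- Pre_ excludes exactly n = 0, where A never returns: next('') is '' again, so A's while loop runs forever.
def Pre_count_contain_s (n : Int) (s : String) : Prop := n ≠ 0
instance (n : Int) (s : String) : Decidable (Pre_count_contain_s n s) := by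
  unfold Pre_count_contain_s; infer_instance

def pvWitness_count_contain_s : Int × String := (2, "ab")

def Spec_count_contain_s (n : Int) (s : String) (out : Int) : Prop := out = count_contain_s_alt n s
instance (n : Int) (s : String) (out : Int) : Decidable (Spec_count_contain_s n s out) := by
  unfold Spec_count_contain_s; infer_instance

-- ===== CLAIM (what is proved, stated in full; the proofs are below) =====
def Claim_equal_count_contain_s : Prop := ∀ (n : Int) (s : String), Dom_count_contain_s n s →
  Pre_count_contain_s n s → Spec_count_contain_s n s (count_contain_s n s)

-- ===== LEMMAS AND PROOFS =====

-- successor of an alphabet character (proof-side only)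
def pvSucc (c : Char) : Char := if c = 'a' then 'b' else if c = 'b' then 'c' else 'd'

-- one Cartesian extension step and the list of all length-m words in lexicographic order
def pvStep (ws : List (List Char)) : List (List Char) :=
  ws.flatMap (fun w => ['a', 'b', 'c', 'd'].map (fun c => w ++ [c]))

def pvL : Nat → List (List Char)
  | 0 => [[]]
  | m + 1 => pvStep (pvL m)

def pvHasABC (w : List Char) : Prop := ∃ c ∈ w, c ∈ (['a', 'b', 'c'] : List Char)

-- Python str.count with a single-character needle is plain character counting
theorem pv_countGo_singleton (ch : Char) : ∀ (l : List Char) (fuel acc : ℕ), l.length ≤ fuel →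
    PySem.Chars.count.go [ch] fuel l acc = acc + l.count ch := by
  intro l
  induction l with
  | nil => intro fuel acc _; cases fuel <;> simp [PySem.Chars.count.go]
  | cons h t ih =>
    intro fuel acc hf
    cases fuel with
    | zero => simp at hf
    | succ fuel =>
      simp only [PySem.Chars.count.go]
      by_cases hch : ch = h
      · subst hch
        simp only [List.isPrefixOf, BEq.rfl, Bool.true_and, if_pos]
        rw [show List.drop [ch].length (ch :: t) = t by simp]
        rw [ih fuel (acc + 1) (by simp at hf; omega)]
        simp
        omega
      · have hpf : ([ch].isPrefixOf (h :: t)) = false := by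
          simp [List.isPrefixOf, hch]
        rw [hpf]
        simp only [Bool.false_eq_true, if_false]
        rw [ih fuel acc (by simp at hf; omega)]
        simp [List.count_cons]
        intro hc; exact absurd hc.symm hch


theorem pv_count_singleton (l : List Char) (ch : Char) :
    PySem.Chars.count l [ch] = l.count ch := by
  unfold PySem.Chars.count
  simp [pv_countGo_singleton ch l l.length 0 le_rfl]

theorem pv_count_ne_of_hasABC {w : List Char} (h : pvHasABC w) :
    PySem.Chars.count w ['d'] ≠ w.length := by
  rw [pv_count_singleton]
  intro hc
  rw [List.count_eq_length] at hc
  obtain ⟨c, hcw, hcabc⟩ := h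
  have := hc c hcw
  fin_cases hcabc <;> simp_all

theorem pv_innerEval (s : List Char) (i : Int) (c : Char)
    (hc : c ∈ (['a', 'b', 'c'] : List Char)) (hi : PySem.List.pyGetD s i ' ' = c) :
    pvNextInner s i (PySem.List.pyRange 0 (pvA.length : Int) 1) =
      PySem.List.slice s (some 0) (some i) ++ [pvSucc c] ++
        List.replicate (PySem.List.slice s (some (i + 1)) none).length 'a' := by
  have hr : PySem.List.pyRange 0 (pvA.length : Int) 1 = [0, 1, 2, 3] := by decide
  have h0 : PySem.List.pyGetD pvA 0 ' ' = 'a' := by decide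
  have h1 : PySem.List.pyGetD pvA (0+1) ' ' = 'b' := by decide
  have h1' : PySem.List.pyGetD pvA 1 ' ' = 'b' := by decide
  have h2 : PySem.List.pyGetD pvA (1+1) ' ' = 'c' := by decide
  have h2' : PySem.List.pyGetD pvA 2 ' ' = 'c' := by decide
  have h3 : PySem.List.pyGetD pvA (2+1) ' ' = 'd' := by decide
  have h3' : PySem.List.pyGetD pvA 3 ' ' = 'd' := by decide
  rw [hr]
  fin_cases hc <;>
    simp [pvNextInner, hi, pvSucc, h0, h1, h1', h2, h2', h3, h3']

theorem pv_next_snoc (w : List Char) (c : Char) (hc : c ∈ (['a','b','c'] : List Char)) :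
    pvNext (w ++ [c]) = w ++ [pvSucc c] := by
  have hcd : c ≠ 'd' := by fin_cases hc <;> decide
  have hcount : PySem.Chars.count (w ++ [c]) ['d'] ≠ (w ++ [c]).length :=
    pv_count_ne_of_hasABC ⟨c, by simp, hc⟩
  have hget : PySem.List.pyGetD (w ++ [c]) (w.length : Int) ' ' = c := by
    rw [PySem.List.pyGetD_natCast]
    simp [List.getD]
  have hdneg : PySem.List.pyGetD pvA (-1) ' ' = 'd' := by decide
  have hmem : c ∈ pvA := by fin_cases hc <;> decide
  unfold pvNext
  rw [show ((w ++ [c]).length : Int) - 1 = (w.length : Int) by simp]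
  rw [PySem.List.pyRange_neg_one_cons (by omega)]
  simp only [pvNextGo, if_neg hcount, hget, hdneg, if_neg hcd, if_pos hmem]
  rw [pv_innerEval _ _ c hc hget]
  have hslice1 : PySem.List.slice (w ++ [c]) (some 0) (some (w.length : Int)) = w := by
    rw [PySem.List.slice_zero_start, PySem.List.slice_to_natCast]
    simp
  have hslice2 : PySem.List.slice (w ++ [c]) (some ((w.length : Int) + 1)) none = [] := by
    rw [show ((w.length : Int) + 1) = ((w.length + 1 : ℕ) : Int) by push_cast; ring,
      PySem.List.slice_from_natCast]
    simp
  rw [hslice1, hslice2]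
  simp

theorem pv_nextGo_append_d (I : List Int) : ∀ (s : List Char),
    (∀ i ∈ I, 0 ≤ i ∧ i < (s.length : Int)) →
    (∃ i ∈ I, ∃ c, s[i.toNat]? = some c ∧ c ∈ (['a', 'b', 'c'] : List Char)) →
    pvNextGo (s ++ ['d']) I = pvNextGo s I ++ ['a'] := by
  induction I with
  | nil => intro s _ hw; simp at hw
  | cons i rest ih =>
    intro s hv hw
    obtain ⟨hi0, hilen⟩ := hv i (List.mem_cons_self ..)
    obtain ⟨j, hjI, cj, hcj, hcjabc⟩ := hw
    have hsmem : cj ∈ s := List.mem_of_getElem? hcj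
    have hc2 : PySem.Chars.count s ['d'] ≠ s.length :=
      pv_count_ne_of_hasABC ⟨cj, hsmem, hcjabc⟩
    have hc1 : PySem.Chars.count (s ++ ['d']) ['d'] ≠ (s ++ ['d']).length :=
      pv_count_ne_of_hasABC ⟨cj, List.mem_append_left _ hsmem, hcjabc⟩
    have hiNat : i.toNat < s.length := by omega
    have e : PySem.List.pyGetD (s ++ ['d']) i ' ' = PySem.List.pyGetD s i ' ' := by
      rw [PySem.List.pyGetD_of_nonneg _ _ hi0, PySem.List.pyGetD_of_nonneg _ _ hi0]
      simp [List.getD, List.getElem?_append_left, hiNat]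
    have hdneg : PySem.List.pyGetD pvA (-1) ' ' = 'd' := by decide
    have hgetval : s[i.toNat]? = some (PySem.List.pyGetD s i ' ') := by
      rw [PySem.List.pyGetD_of_nonneg _ _ hi0]
      simp [List.getD, List.getElem?_eq_getElem hiNat]
    by_cases hd : PySem.List.pyGetD s i ' ' = 'd'
    · have hjrest : j ∈ rest := by
        rcases List.mem_cons.mp hjI with hji | h
        · rw [hji] at hcj
          rw [hgetval] at hcj
          rw [hd] at hcj
          obtain rfl : cj = 'd' := (Option.some.inj hcj).symm
          simp at hcjabc
        · exact h
      simp only [pvNextGo, if_neg hc1, if_neg hc2, e, hdneg, hd, if_pos rfl]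
      exact ih s (fun k hk => hv k (List.mem_cons_of_mem _ hk)) ⟨j, hjrest, cj, hcj, hcjabc⟩
    · by_cases hmem : PySem.List.pyGetD s i ' ' ∈ pvA
      · have habcmem : PySem.List.pyGetD s i ' ' ∈ (['a', 'b', 'c'] : List Char) := by
          have hmem' := hmem
          simp only [pvA, List.mem_cons, List.not_mem_nil, or_false] at hmem'
          rcases hmem' with h | h | h | h
          · simp [h]
          · simp [h]
          · simp [h]
          · exact absurd h hd
        simp only [pvNextGo, if_neg hc1, if_neg hc2, e, hdneg, if_neg hd, if_pos hmem]
        rw [pv_innerEval (s ++ ['d']) i _ habcmem e, pv_innerEval s i _ habcmem rfl]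
        have hsl1 : PySem.List.slice (s ++ ['d']) (some 0) (some i) =
            PySem.List.slice s (some 0) (some i) := by
          rw [PySem.List.slice_zero_start, PySem.List.slice_zero_start,
            PySem.List.slice_to _ hi0, PySem.List.slice_to _ hi0,
            List.take_append_of_le_length (by omega)]
        have hlen1 : (PySem.List.slice (s ++ ['d']) (some (i + 1)) none).length =
            (PySem.List.slice s (some (i + 1)) none).length + 1 := by
          rw [PySem.List.slice_from _ (by omega), PySem.List.slice_from _ (by omega)]
          simp
          omega
        rw [hsl1, hlen1, List.replicate_succ']
        simp
      · have hjrest : j ∈ rest := by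
          rcases List.mem_cons.mp hjI with hji | h
          · rw [hji] at hcj
            rw [hgetval] at hcj
            obtain rfl : cj = PySem.List.pyGetD s i ' ' := (Option.some.inj hcj).symm
            have hsub : ∀ x ∈ (['a', 'b', 'c'] : List Char), x ∈ pvA := by intro x hx; fin_cases hx <;> decide
            exact absurd (hsub _ hcjabc) hmem
          · exact h
        simp only [pvNextGo, if_neg hc1, if_neg hc2, e, hdneg, if_neg hd, if_neg hmem]
        exact ih s (fun k hk => hv k (List.mem_cons_of_mem _ hk)) ⟨j, hjrest, cj, hcj, hcjabc⟩

theorem pv_next_append_d (s : List Char) (h : pvHasABC s) :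
    pvNext (s ++ ['d']) = pvNext s ++ ['a'] := by
  obtain ⟨c, hcs, hcabc⟩ := h
  have hc1 : PySem.Chars.count (s ++ ['d']) ['d'] ≠ (s ++ ['d']).length :=
    pv_count_ne_of_hasABC ⟨c, List.mem_append_left _ hcs, hcabc⟩
  have hget : PySem.List.pyGetD (s ++ ['d']) (s.length : Int) ' ' = 'd' := by
    rw [PySem.List.pyGetD_natCast]
    simp [List.getD]
  have hdneg : PySem.List.pyGetD pvA (-1) ' ' = 'd' := by decide
  obtain ⟨j, hjc⟩ := List.getElem?_of_mem hcs
  have hjlen : j < s.length := (List.getElem?_eq_some_iff.mp hjc).1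
  unfold pvNext
  rw [show ((s ++ ['d']).length : Int) - 1 = (s.length : Int) by simp]
  rw [PySem.List.pyRange_neg_one_cons (by omega)]
  simp only [pvNextGo, if_neg hc1, hget, hdneg]
  exact pv_nextGo_append_d _ s
    (fun i hi => by
      have := (PySem.List.mem_pyRange_neg_one).mp hi
      omega)
    ⟨(j : Int), by
      rw [PySem.List.mem_pyRange_neg_one]
      omega, c, by simpa using hjc, hcabc⟩

theorem pv_next_all_d (m : ℕ) (hm : 1 ≤ m) :
    pvNext (List.replicate m 'd') = List.replicate (m + 1) 'a' := by
  have hcount : PySem.Chars.count (List.replicate m 'd') ['d'] =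
      (List.replicate m 'd').length := by
    rw [pv_count_singleton]
    simp
  unfold pvNext
  rw [PySem.List.pyRange_neg_one_cons (by simp; omega)]
  simp only [pvNextGo, if_pos hcount]
  simp

theorem pv_len_mem_pvL : ∀ (m : ℕ) (w : List Char), w ∈ pvL m → w.length = m := by
  intro m
  induction m with
  | zero => intro w hw; simp [pvL] at hw; simp [hw]
  | succ m ih =>
    intro w hw
    simp only [pvL, pvStep, List.mem_flatMap, List.mem_map] at hw
    obtain ⟨u, hu, c, _, rfl⟩ := hw
    simp [ih u hu]

theorem pv_pvL_ne_nil (m : ℕ) : pvL m ≠ [] := by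
  induction m with
  | zero => simp [pvL]
  | succ m ih =>
    simp only [pvL, pvStep]
    simp only [ne_eq, List.flatMap_eq_nil_iff, not_forall]
    refine ⟨(pvL m).head ih, List.head_mem ih, by simp⟩

theorem pv_head_pvL (m : ℕ) : (pvL m).head? = some (List.replicate m 'a') := by
  induction m with
  | zero => simp [pvL]
  | succ m ih =>
    obtain ⟨w, t, hwt⟩ := List.exists_cons_of_ne_nil (pv_pvL_ne_nil m)
    have hw : w = List.replicate m 'a' := by rw [hwt] at ih; simpa using ih
    simp only [pvL, pvStep, hwt, List.flatMap_cons]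
    simp [hw, List.replicate_succ']

theorem pv_getLast_pvL (m : ℕ) : (pvL m).getLast? = some (List.replicate m 'd') := by
  induction m with
  | zero => simp [pvL]
  | succ m ih =>
    obtain ⟨ys, hys⟩ := List.getLast?_eq_some_iff.mp ih
    simp only [pvL, pvStep, hys, List.flatMap_append, List.flatMap_cons, List.flatMap_nil]
    rw [List.getLast?_append]
    simp [List.replicate_succ']

theorem pv_hasABC_dropLast : ∀ (m : ℕ) (w : List Char), w ∈ (pvL m).dropLast → pvHasABC w := by
  intro m
  induction m with
  | zero => intro w hw; simp [pvL] at hw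
  | succ m ih =>
    intro w hw
    obtain ⟨ys, hys⟩ := List.getLast?_eq_some_iff.mp (pv_getLast_pvL m)
    have hys' : (pvL m).dropLast = ys := by rw [hys]; simp
    simp only [pvL, pvStep, hys, List.flatMap_append, List.flatMap_cons, List.flatMap_nil] at hw
    rw [List.dropLast_append] at hw
    simp only [List.map, List.append_nil] at hw
    rcases (by simpa using hw :
        (∃ a ∈ ys, w = a ++ ['a'] ∨ w = a ++ ['b'] ∨ w = a ++ ['c'] ∨ w = a ++ ['d']) ∨
        w = List.replicate m 'd' ++ ['a'] ∨ w = List.replicate m 'd' ++ ['b'] ∨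
        w = List.replicate m 'd' ++ ['c']) with ⟨u, hu, hcase⟩ | h | h | h
    · obtain ⟨c0, hc0, hc0abc⟩ := ih u (by rw [hys']; exact hu)
      rcases hcase with rfl | rfl | rfl | rfl <;> exact ⟨c0, List.mem_append_left _ hc0, hc0abc⟩
    · subst h; exact ⟨'a', List.mem_append_right _ (by simp), by simp⟩
    · subst h; exact ⟨'b', List.mem_append_right _ (by simp), by simp⟩
    · subst h; exact ⟨'c', List.mem_append_right _ (by simp), by simp⟩

theorem pv_chain_block (w : List Char) :
    List.IsChain (fun x y => pvNext x = y) [w ++ ['a'], w ++ ['b'], w ++ ['c'], w ++ ['d']] := by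
  refine List.isChain_cons_cons.mpr ⟨?_, List.isChain_cons_cons.mpr ⟨?_, List.isChain_cons_cons.mpr ⟨?_, ?_⟩⟩⟩
  · rw [pv_next_snoc w 'a' (by simp)]; rfl
  · rw [pv_next_snoc w 'b' (by simp)]; rfl
  · rw [pv_next_snoc w 'c' (by simp)]; rfl
  · simp

theorem pv_chain_pvStep : ∀ (ws : List (List Char)),
    List.IsChain (fun x y => pvNext x = y) ws →
    (∀ w ∈ ws.dropLast, pvHasABC w) →
    List.IsChain (fun x y => pvNext x = y) (pvStep ws) := by
  intro ws
  induction ws with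
  | nil => intro _ _; simp [pvStep]
  | cons w t ih =>
    intro hch hd
    have hsplit : pvStep (w :: t) =
        [w ++ ['a'], w ++ ['b'], w ++ ['c'], w ++ ['d']] ++ pvStep t := by
      simp [pvStep]
    rw [hsplit]
    rw [List.isChain_append]
    refine ⟨pv_chain_block w, ?_, ?_⟩
    · cases t with
      | nil => simp [pvStep]
      | cons w' t' =>
        exact ih (hch.of_cons) (fun u hu => hd u (by
          rw [List.dropLast_cons_of_ne_nil (by simp)]
          exact List.mem_cons_of_mem _ hu))
    · intro x hx y hy
      cases t with
      | nil => simp [pvStep] at hy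
      | cons w' t' =>
        have hx' : x = w ++ ['d'] := by symm; simpa using hx
        have hy' : y = w' ++ ['a'] := by
          have : (pvStep (w' :: t')).head? = some (w' ++ ['a']) := by simp [pvStep]
          rw [this] at hy; symm; simpa using hy
        subst hx'; subst hy'
        have hABC : pvHasABC w := hd w (by
          rw [List.dropLast_cons_of_ne_nil (by simp)]; exact List.mem_cons_self ..)
        rw [pv_next_append_d w hABC, (List.isChain_cons_cons.mp hch).1]

theorem pv_chain_pvL (m : ℕ) : List.IsChain (fun x y => pvNext x = y) (pvL m) := by
  induction m with
  | zero => simp [pvL]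
  | succ m ih => exact pv_chain_pvStep (pvL m) ih (pv_hasABC_dropLast m)

theorem pv_length_pvL (m : ℕ) : (pvL m).length = 4 ^ m := by
  induction m with
  | zero => simp [pvL]
  | succ m ih =>
    simp only [pvL, pvStep, List.length_flatMap]
    simp [ih, pow_succ, Nat.mul_comm]

theorem pv_foldl_pyRange_step (n : ℕ) :
    (PySem.List.pyRange 0 (n : Int) 1).foldl
      (fun ws _ => ws.flatMap (fun w => ['a', 'b', 'c', 'd'].map (fun c => w ++ [c])))
      [([] : List Char)] = pvL n := by
  induction n with
  | zero => simp [PySem.List.pyRange_one_eq_nil, pvL]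
  | succ n ih =>
    rw [show ((n + 1 : ℕ) : Int) = (n : Int) + 1 by push_cast; ring]
    rw [PySem.List.pyRange_one_succ_right (by omega), List.foldl_append, ih]
    simp [pvL, pvStep]

theorem pv_loopA_run (n : Int) (s : List Char) :
    ∀ (ws : List (List Char)) (h : ws ≠ []), (∀ w ∈ ws, (w.length : Int) = n) →
    List.IsChain (fun x y => pvNext x = y) ws →
    (((pvNext (ws.getLast h)).length : Int) ≠ n) →
    ∀ (count : Int) (fuel : ℕ), ws.length < fuel →
      pvLoopA n s fuel (ws.head h) count =
        ws.foldl (fun acc w => acc + if PySem.Chars.isIn s w then 1 else 0) count := by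
  intro ws
  induction ws with
  | nil => intro h; exact absurd rfl h
  | cons w t ih =>
    intro _ hlen hch hexit count fuel hf
    cases fuel with
    | zero => omega
    | succ fuel =>
      simp only [List.head_cons]
      simp only [pvLoopA, if_pos (hlen w (List.mem_cons_self ..))]
      cases t with
      | nil =>
        cases fuel with
        | zero => simp at hf
        | succ fuel =>
          have hexit' : ((pvNext w).length : Int) ≠ n := by
            simpa [List.getLast_singleton] using hexit
          simp only [pvLoopA, if_neg hexit', List.foldl_cons, List.foldl_nil]
      | cons w' t' =>
        have hnext : pvNext w = w' := (List.isChain_cons_cons.mp hch).1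
        rw [hnext]
        have := ih (h := by simp)
          (fun u hu => hlen u (List.mem_cons_of_mem _ hu))
          hch.of_cons
          (by
            rw [List.getLast_cons (by simp)] at hexit
            exact hexit)
          (count + if PySem.Chars.isIn s w then 1 else 0) fuel (by simp at hf ⊢; omega)
        simpa using this

theorem pv_foldl_count_eq (s : List Char) : ∀ (ws : List (List Char)) (acc : Int),
    ws.foldl (fun acc w => acc + if PySem.Chars.isIn s w then 1 else 0) acc =
      ws.foldl (fun acc w => if PySem.Chars.isIn s w then acc + 1 else acc) acc := by
  intro ws
  induction ws with
  | nil => intro acc; rfl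
  | cons w t ih =>
    intro acc
    simp only [List.foldl_cons, ih]
    by_cases h : PySem.Chars.isIn s w <;> simp [h]

theorem pv_main : ∀ (n : Int) (s : String), n ≠ 0 →
    count_contain_s n s = count_contain_s_alt n s := by
  intro n s hn
  by_cases hneg : n < 0
  · have h0 : n.toNat = 0 := by omega
    unfold count_contain_s count_contain_s_alt
    rw [h0]
    simp only [pvLoopA]
    rw [if_neg (by simpa using by omega : ¬((List.replicate 0 'a').length : Int) = n)]
    rw [if_pos hneg]
  · have hpos : 0 < n := by omega
    set m := n.toNat with hm
    have hn' : n = (m : Int) := by omega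
    have hm1 : 1 ≤ m := by omega
    unfold count_contain_s count_contain_s_alt
    rw [if_neg (by omega)]
    simp only [hn']
    rw [pv_foldl_pyRange_step m]
    rw [← pv_foldl_count_eq]
    have hhead : (pvL m).head (pv_pvL_ne_nil m) = List.replicate m 'a' := by
      have h1 : (pvL m).head? = some ((pvL m).head (pv_pvL_ne_nil m)) :=
        List.head?_eq_some_head _
      exact Option.some.inj (h1.symm.trans (pv_head_pvL m))
    have hlast : (pvL m).getLast (pv_pvL_ne_nil m) = List.replicate m 'd' := by
      have h1 : (pvL m).getLast? = some ((pvL m).getLast (pv_pvL_ne_nil m)) :=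
        List.getLast?_eq_some_getLast _
      exact Option.some.inj (h1.symm.trans (pv_getLast_pvL m))
    simp only [Int.toNat_natCast]
    rw [← hhead]
    refine pv_loopA_run ((m : Int)) s.toList (pvL m) (pv_pvL_ne_nil m)
      (fun w hw => by rw [pv_len_mem_pvL m w hw])
      (pv_chain_pvL m)
      (by
        rw [hlast, pv_next_all_d m hm1]
        simp)
      0 (4 ^ m + 1) (by rw [pv_length_pvL]; omega)

-- ===== VERDICT (by name: the statement is the Claim_ definition above) =====
theorem count_contain_s_spec : Claim_equal_count_contain_s := by
  intro n s _ hpre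
  unfold Spec_count_contain_s
  exact pv_main n s hpre
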